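-- pv_equiv track=rewrite | github.com/huangweijing/weo_leetcode | 79_Word_Search.py | check_alp_cnt
-- ===== SOURCE A (Python) =====
-- def check_alp_cnt(board: list[list[str]], word) -> bool:
--     alp_table = dict[str, int]()
--     alp_table2 = dict[str, int]()
--     for row in board:
--         for cell in row:
--             if cell not in alp_table:
--                 alp_table[cell] = 1
--             else:
--                 alp_table[cell] += 1
--     for ch in word:
--         if ch not in alp_table2:
--             alp_table2[ch] = 1
--         else:
--             alp_table2[ch] += 1
--     for key in alp_table2.keys():
--         if key not in alp_table.keys():
--             return False
--         else:
--             if alp_table2[key] > alp_table[key]: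
--                 return False
--     return True
-- ===== SOURCE B (Python) =====
-- def check_alp_cnt(board: list[list[str]], word) -> bool:
--     have = {}
--     for row in board:
--         for cell in row:
--             have[cell] = have.get(cell, 0) + 1
--     for ch in word:
--         n = have.get(ch, 0) - 1
--         if n < 0:
--             return False
--         have[ch] = n
--     return True
-- ===== Notes on version B (the rewrite author's own statement) =====
-- stated objective: simpler
-- what changed: Drops A's second frequency table and its separate key-comparison loop: B builds only the board counter, then makes a single consuming pass over the word that decrements the counter in place and returns False as soon as a letter runs out (no word-frequency dict, one loop fewer).
import Mathlib
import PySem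

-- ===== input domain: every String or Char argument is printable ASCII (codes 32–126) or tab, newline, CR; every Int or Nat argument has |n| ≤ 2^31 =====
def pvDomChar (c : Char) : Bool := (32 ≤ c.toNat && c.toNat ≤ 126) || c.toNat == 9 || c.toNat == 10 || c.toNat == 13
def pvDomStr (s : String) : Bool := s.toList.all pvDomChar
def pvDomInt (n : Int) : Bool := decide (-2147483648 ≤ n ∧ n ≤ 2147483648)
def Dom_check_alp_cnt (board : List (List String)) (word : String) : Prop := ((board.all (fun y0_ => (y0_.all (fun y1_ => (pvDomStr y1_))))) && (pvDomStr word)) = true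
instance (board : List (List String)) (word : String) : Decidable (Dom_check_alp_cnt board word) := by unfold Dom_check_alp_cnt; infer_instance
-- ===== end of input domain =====

-- B drops A's second frequency table and its comparison loop: it builds only the board
-- counter and consumes it in one decrementing pass over the word (objective: simpler).

-- ===== PORT A =====
-- the final 'for key in alp_table2.keys(): … return False …' loop, early return = recursion stop.
-- alp_table2[key]/alp_table[key] are ported as getD _ 0: key is always present (key ∈ d2.keys,
-- and the d1 access sits under the 'key in alp_table' branch), so Python never raises here.
def pvCheckKeys (d1 d2 : PySem.Dict String Int) : List String → Bool
  | [] => true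
  | k :: ks =>
    if !(d1.contains k) then false
    else if d2.getD k 0 > d1.getD k 0 then false
    else pvCheckKeys d1 d2 ks

def check_alp_cnt (board : List (List String)) (word : String) : Bool :=
  let alp_table := board.foldl (fun d row =>
    row.foldl (fun d cell =>
      if !(d.contains cell) then d.insert cell 1
      else d.insert cell (d.getD cell 0 + 1)) d) PySem.Dict.empty
  let alp_table2 := (word.toList.map (fun c => String.ofList [c])).foldl (fun d ch =>
    if !(d.contains ch) then d.insert ch 1
    else d.insert ch (d.getD ch 0 + 1)) PySem.Dict.empty
  pvCheckKeys alp_table alp_table2 alp_table2.keys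

-- ===== PORT B =====
-- the 'for ch in word: n = have.get(ch, 0) - 1; if n < 0: return False; have[ch] = n' loop
def pvConsume : PySem.Dict String Int → List String → Bool
  | _, [] => true
  | d, ch :: rest =>
    let n := d.getD ch 0 - 1
    if n < 0 then false else pvConsume (d.insert ch n) rest

def check_alp_cnt_alt (board : List (List String)) (word : String) : Bool :=
  let haveD := board.foldl (fun d row =>
    row.foldl (fun d cell => d.insert cell (d.getD cell 0 + 1)) d) PySem.Dict.empty
  pvConsume haveD (word.toList.map (fun c => String.ofList [c]))

-- ===== PRECONDITION & SPEC =====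
def Spec_check_alp_cnt (board : List (List String)) (word : String) (out : Bool) : Prop := out = check_alp_cnt_alt board word
instance (board : List (List String)) (word : String) (out : Bool) : Decidable (Spec_check_alp_cnt board word out) := by unfold Spec_check_alp_cnt; infer_instance

-- ===== CLAIM (what is proved, stated in full; the proofs are below) =====
def Claim_equal_check_alp_cnt : Prop := ∀ (board : List (List String)) (word : String), Dom_check_alp_cnt board word → Spec_check_alp_cnt board word (check_alp_cnt board word)

-- ===== LEMMAS AND PROOFS =====

-- A's counting branch is exactly the insert-(getD+1) counter step
theorem pv_branch_eq :
    (fun (d : PySem.Dict String Int) (x : String) =>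
      if !(d.contains x) then d.insert x 1 else d.insert x (d.getD x 0 + 1))
    = (fun d x => d.insert x (d.getD x 0 + 1)) := by
  funext d x
  by_cases h : d.contains x = true
  · simp [h]
  · simp only [Bool.not_eq_true] at h
    simp [h, PySem.Dict.getD_of_not_contains d 0 h]

-- A's early-return key loop is an all
theorem pvCheckKeys_eq_all (d1 d2 : PySem.Dict String Int) (ks : List String) :
    pvCheckKeys d1 d2 ks
      = ks.all (fun k => d1.contains k && !(decide (d2.getD k 0 > d1.getD k 0))) := by
  induction ks with
  | nil => rfl
  | cons k ks ih =>
    by_cases h : d1.contains k = true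
    · by_cases h2 : d2.getD k 0 > d1.getD k 0
      · simp [pvCheckKeys, h, h2]
      · simp [pvCheckKeys, h, h2, ih]
    · simp only [Bool.not_eq_true] at h
      simp [pvCheckKeys, h]

-- B's consuming loop succeeds iff every multiplicity in the word fits inside the dict
theorem pvConsume_eq (ws : List String) : ∀ d : PySem.Dict String Int,
    pvConsume d ws = decide (∀ k ∈ ws, (ws.count k : Int) ≤ d.getD k 0) := by
  induction ws with
  | nil => intro d; simp [pvConsume]
  | cons ch rest ih =>
    intro d
    by_cases h : d.getD ch 0 - 1 < 0
    · have hne : ¬ (∀ k ∈ ch :: rest, ((ch :: rest).count k : Int) ≤ d.getD k 0) := by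
        intro H
        have := H ch (by simp)
        have hc : 1 ≤ (ch :: rest).count ch := List.count_pos_iff.mpr List.mem_cons_self
        have : (1 : Int) ≤ d.getD ch 0 := le_trans (by exact_mod_cast hc) this
        omega
      have hfalse : pvConsume d (ch :: rest) = false := by simp [pvConsume, h]
      rw [hfalse]
      exact (decide_eq_false hne).symm
    · simp only [pvConsume, h, if_false, ih]
      have hg : (1 : Int) ≤ d.getD ch 0 := by omega
      congr 1
      apply propext
      constructor
      · intro H k hk
        rcases eq_or_ne k ch with rfl | hne
        · have hr : (rest.count k : Int) ≤ d.getD k 0 - 1 := by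
            by_cases hm : k ∈ rest
            · have := H k hm
              simpa [PySem.Dict.getD_insert] using this
            · have : rest.count k = 0 := List.count_eq_zero.mpr hm
              rw [this]; push_cast; omega
          have : (k :: rest).count k = rest.count k + 1 := by simp
          rw [this]; push_cast; omega
        · have hk' : k ∈ rest := by
            rcases List.mem_cons.mp hk with h' | h'
            · exact absurd h' hne
            · exact h'
          have := H k hk'
          rw [PySem.Dict.getD_insert] at this
          simp only [if_neg hne] at this
          have hcnt : (ch :: rest).count k = rest.count k := by
            simp [Ne.symm hne]
          rw [hcnt]; exact this
      · intro H k hk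
        rw [PySem.Dict.getD_insert]
        rcases eq_or_ne k ch with rfl | hne
        · rw [if_pos rfl]
          have := H k (by simp)
          have hcnt : (k :: rest).count k = rest.count k + 1 := by simp
          rw [hcnt] at this; push_cast at this ⊢; omega
        · simp only [if_neg hne]
          have := H k (List.mem_cons_of_mem _ hk)
          have hcnt : (ch :: rest).count k = rest.count k := by
            simp [Ne.symm hne]
          rw [hcnt] at this; exact this

-- A's table-comparison all over the word's distinct letters, in closed form
theorem pvA_all_eq (wl cells : List String) :
    (PySem.Set.ofList wl).all
      (fun k => cells.contains k && !(decide ((cells.count k : Int) < (wl.count k : Int))))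
      = decide (∀ k ∈ wl, ((wl.count k : Int) ≤ (cells.count k : Int))) := by
  rw [Bool.eq_iff_iff]
  simp only [List.all_eq_true, PySem.Set.mem_ofList, Bool.and_eq_true, Bool.not_eq_true',
    decide_eq_false_iff_not, not_lt, List.contains_eq_mem, decide_eq_true_eq]
  constructor
  · intro H k hk; exact (H k hk).2
  · intro H k hk
    refine ⟨?_, H k hk⟩
    have h1 : 1 ≤ (wl.count k : Int) := by
      exact_mod_cast List.count_pos_iff.mpr hk
    have : (1 : Int) ≤ (cells.count k : Int) := le_trans h1 (H k hk)
    have : 0 < cells.count k := by exact_mod_cast lt_of_lt_of_le (by omega : (0:Int) < 1) this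
    exact List.count_pos_iff.mp this

-- ===== VERDICT (by name: the statement is the Claim_ definition above) =====
theorem check_alp_cnt_spec : Claim_equal_check_alp_cnt := by
  intro board word _
  unfold Spec_check_alp_cnt check_alp_cnt check_alp_cnt_alt
  rw [pv_branch_eq]
  rw [← List.foldl_flatten,
      PySem.Dict.foldl_insert_getD_add_one_eq_counter,
      PySem.Dict.foldl_insert_getD_add_one_eq_counter]
  set wl := word.toList.map (fun c => String.ofList [c]) with hwl
  set cells := board.flatten with hcells
  rw [pvCheckKeys_eq_all, PySem.Dict.keys_counter, pvConsume_eq]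
  have hpred : ∀ k, (fun k => (PySem.Dict.counter cells).contains k &&
        !(decide ((PySem.Dict.counter wl).getD k 0 > (PySem.Dict.counter cells).getD k 0))) k
      = (fun k => cells.contains k && !(decide ((cells.count k : Int) < (wl.count k : Int)))) k := by
    intro k
    simp [PySem.Dict.contains_counter, PySem.Dict.getD_counter]
  rw [funext hpred, pvA_all_eq]
  congr 1
  apply propext
  constructor
  · intro H k hk
    have := H k hk
    rw [PySem.Dict.getD_counter]; exact this
  · intro H k hk
    have := H k hk
    rw [PySem.Dict.getD_counter] at this; exact this
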